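-- pv_equiv track=rewrite | github.com/andreiclu/Python_basics | medium_hard_problems/lonely_numbers.py | numbers_need_friends_too
-- ===== SOURCE A (Python) =====
-- def numbers_need_friends_too(n):
--     st = str(n)
--     groups = []
--     current = ''
--
--     for i in st:
--         if i in current or current =='':
--             current+=i
--         else:
--             groups.append(current)
--             current = i
--     if current!='':
--         groups.append(current)
--
--     for i in range(len(groups)):
--         if len(groups[i])==1:
--             groups[i] = groups[i].replace(groups[i][0], groups[i][0]*3,1)
--     return int(''.join(groups))
-- ===== SOURCE B (Python) =====
-- def numbers_need_friends_too(n):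
--     # One recursive pass with a neighbour test: a digit equal to its previous
--     # or next character is part of a run and is kept once; otherwise tripled.
--     def go(chars, prev):
--         if not chars:
--             return ''
--         c, rest = chars[0], chars[1:]
--         part = c if (prev == c or rest[:1] == c) else c * 3
--         return part + go(rest, c)
--     return int(go(str(n), ''))
-- ===== Notes on version B (the rewrite author's own statement) =====
-- stated objective: simpler
-- what changed: Replaces A's two-pass group-then-fix approach (build a list of runs, then mutate singleton groups by replace) with a single recursive pass that decides per digit from its neighbours whether to keep or triple it.
-- outside the precondition, e.g. on numbers_need_friends_too(-5): A raises ValueError, B raises ValueError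
import Mathlib
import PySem

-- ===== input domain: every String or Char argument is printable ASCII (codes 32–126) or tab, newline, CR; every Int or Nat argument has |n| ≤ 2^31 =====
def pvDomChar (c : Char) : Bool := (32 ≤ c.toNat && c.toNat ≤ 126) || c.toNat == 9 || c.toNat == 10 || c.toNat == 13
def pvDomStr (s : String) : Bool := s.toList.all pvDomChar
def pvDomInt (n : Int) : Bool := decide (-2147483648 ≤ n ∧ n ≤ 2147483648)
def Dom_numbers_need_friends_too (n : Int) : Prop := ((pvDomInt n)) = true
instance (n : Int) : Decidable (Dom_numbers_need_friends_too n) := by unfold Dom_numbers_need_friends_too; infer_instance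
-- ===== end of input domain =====

-- B replaces A's two-pass grouping (build run groups, then fix singleton groups) with one
-- recursive neighbour-test pass: simpler decomposition, same O(d) cost.


-- ===== PORT A =====
-- A's first loop over str(n): `i in current` is Python substring membership, which for a
-- single-character `i` is exactly char membership in current's char list (exact).
def pvLoopA : List Char → List (List Char) → List Char → List (List Char)
  | [], gs, cur => if cur ≠ [] then gs ++ [cur] else gs
  | c :: cs, gs, cur =>
      if c ∈ cur ∨ cur = [] then pvLoopA cs gs (cur ++ [c])
      else pvLoopA cs (gs ++ [cur]) [c]

-- A's second loop body: groups[i].replace(groups[i][0], groups[i][0]*3, 1) on a length-1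
-- group [c] replaces its sole character by c*3, i.e. yields [c,c,c] (exact for len==1).
def pvTripleA (g : List Char) : List Char :=
  if g.length = 1 then (match g with | c :: _ => [c, c, c] | [] => g) else g

def numbers_need_friends_too (n : Int) : Int :=
  -- int(...) raises ValueError on '-'-containing results (n < 0): excluded by Pre_, so getD 0
  (PySem.Int.ofChars? (((pvLoopA (PySem.Int.toChars n) [] []).map pvTripleA).flatten)).getD 0

-- ===== PORT B =====
-- Source B's go(chars, prev): prev is '' initially (never equal to a char) → Option Char, none;
-- rest[:1] == c is exactly rest.head? = some c.
def pvGoB : List Char → Option Char → List Char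
  | [], _ => []
  | c :: rest, prev =>
      (if prev = some c ∨ rest.head? = some c then [c] else [c, c, c]) ++ pvGoB rest (some c)

def numbers_need_friends_too_alt (n : Int) : Int :=
  (PySem.Int.ofChars? (pvGoB (PySem.Int.toChars n) none)).getD 0

-- ===== PRECONDITION & SPEC =====
-- Pre_ excludes n < 0, where both Pythons raise ValueError: the '-' sign forms a singleton
-- group, is tripled to '---', and int('---…') fails.
def Pre_numbers_need_friends_too (n : Int) : Prop := 0 ≤ n
instance (n : Int) : Decidable (Pre_numbers_need_friends_too n) := by unfold Pre_numbers_need_friends_too; infer_instance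
def pvWitness_numbers_need_friends_too : Int := 1223334444

def Spec_numbers_need_friends_too (n : Int) (out : Int) : Prop := out = numbers_need_friends_too_alt n
instance (n : Int) (out : Int) : Decidable (Spec_numbers_need_friends_too n out) := by unfold Spec_numbers_need_friends_too; infer_instance

-- ===== CLAIM (what is proved, stated in full; the proofs are below) =====
def Claim_equal_numbers_need_friends_too : Prop := ∀ (n : Int), Dom_numbers_need_friends_too n → Pre_numbers_need_friends_too n → Spec_numbers_need_friends_too n (numbers_need_friends_too n)

-- ===== LEMMAS AND PROOFS =====

-- Expected emission for the pending run of k copies of ch with remaining input cs.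
def pvPend (ch : Char) (k : Nat) (cs : List Char) : List Char :=
  if k = 1 ∧ cs.head? ≠ some ch then [ch, ch, ch] else List.replicate k ch

lemma pvTripleA_replicate (ch : Char) (k : Nat) (hk : 1 ≤ k) :
    pvTripleA (List.replicate k ch) = if k = 1 then [ch, ch, ch] else List.replicate k ch := by
  by_cases h1 : k = 1
  · subst h1; simp [pvTripleA]
  · simp [pvTripleA, h1, List.length_replicate]

lemma pvPend_head_ne (ch : Char) (k : Nat) (cs : List Char) (hk : 1 ≤ k)
    (hh : cs.head? ≠ some ch) :
    pvPend ch k cs = pvTripleA (List.replicate k ch) := by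
  rw [pvTripleA_replicate ch k hk]
  simp [pvPend, hh]

lemma pvLoopA_run (cs : List Char) : ∀ (ch : Char) (k : Nat) (gs : List (List Char)), 1 ≤ k →
    ((pvLoopA cs gs (List.replicate k ch)).map pvTripleA).flatten
      = (gs.map pvTripleA).flatten ++ pvPend ch k cs ++ pvGoB cs (some ch) := by
  induction cs with
  | nil =>
      intro ch k gs hk
      have hne : List.replicate k ch ≠ [] := by
        simp [List.replicate_eq_nil_iff]; omega
      rw [pvPend_head_ne ch k [] hk (by simp)]
      simp only [pvLoopA, if_pos hne, List.map_append, List.flatten_append, pvGoB]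
      simp
  | cons c cs ih =>
      intro ch k gs hk
      by_cases hc : c = ch
      · subst hc
        have hmem : c ∈ List.replicate k c := by
          simp [List.mem_replicate]; omega
        have hstep : pvLoopA (c :: cs) gs (List.replicate k c)
            = pvLoopA cs gs (List.replicate (k + 1) c) := by
          simp [pvLoopA, hmem, ← List.replicate_succ' (n := k)]
        rw [hstep, ih c (k + 1) gs (by omega)]
        have hpend1 : pvPend c k (c :: cs) = List.replicate k c := by
          rw [pvPend, if_neg]; simp
        have hpend2 : pvPend c (k + 1) cs = List.replicate (k + 1) c := by
          rw [pvPend, if_neg]; intro h; omega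
        rw [hpend1, hpend2]
        simp [pvGoB, List.replicate_succ' (n := k)]
      · have hne : List.replicate k ch ≠ [] := by
          simp [List.replicate_eq_nil_iff]; omega
        have hmem : c ∉ List.replicate k ch := by
          simp [List.mem_replicate, hc]
        have hstep : pvLoopA (c :: cs) gs (List.replicate k ch)
            = pvLoopA cs (gs ++ [List.replicate k ch]) (List.replicate 1 c) := by
          simp [pvLoopA, hmem, hne]
        rw [hstep, ih c 1 _ (by omega)]
        have hpend : pvPend ch k (c :: cs) = pvTripleA (List.replicate k ch) := by
          refine pvPend_head_ne ch k (c :: cs) hk ?_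
          simp [hc]
        rw [hpend]
        have hgo : pvGoB (c :: cs) (some ch)
            = pvPend c 1 cs ++ pvGoB cs (some c) := by
          simp only [pvGoB, pvPend]
          by_cases hh : cs.head? = some c <;> simp [hh, Ne.symm hc]
        rw [hgo]
        simp

lemma pvStr_eq (l : List Char) :
    ((pvLoopA l [] []).map pvTripleA).flatten = pvGoB l none := by
  cases l with
  | nil => simp [pvLoopA, pvGoB]
  | cons c cs =>
      have hstep : pvLoopA (c :: cs) [] [] = pvLoopA cs [] (List.replicate 1 c) := by
        simp [pvLoopA]
      rw [hstep, pvLoopA_run cs c 1 [] (by omega)]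
      have hgo : pvGoB (c :: cs) none = pvPend c 1 cs ++ pvGoB cs (some c) := by
        simp only [pvGoB, pvPend]
        by_cases hh : cs.head? = some c <;> simp [hh]
      rw [hgo]
      simp

-- ===== VERDICT (by name: the statement is the Claim_ definition above) =====
theorem numbers_need_friends_too_spec : Claim_equal_numbers_need_friends_too := by
  intro n _ _
  unfold Spec_numbers_need_friends_too numbers_need_friends_too numbers_need_friends_too_alt
  rw [pvStr_eq]
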